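-- pv_equiv track=rewrite | github.com/joshuboi77/C-Dictionary | generate_c_dictionary_js.py | to_c_dictionary_js
-- ===== SOURCE A (Python) =====
-- from typing import Dict, List, Optional, Tuple
--
-- def js_escape(s: Optional[str]) -> str:
--     if s is None:
--         return ''
--     s = s.replace('\\', '\\\\').replace("'", "\\'")
--     s = s.replace('\r\n', '\n').replace('\n', '\\n')
--     return s
--
-- def to_c_dictionary_js(merged: Dict[str, Dict[str, Optional[str]]]) -> str:
--     sections: List[Tuple[str, str]] = [
--         ('Keywords', 'keyword'),
--         ('Operators', 'operator'),
--         ('Standard Library Identifiers', 'identifier')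
--     ]
--     lines: List[str] = []
--     lines.append("// Auto-generated from C_Dictionary.md. Do not edit manually.")
--     lines.append("module.exports = {")
--     lines.append("  title: 'C Language Reference',")
--     lines.append("  sections: [")
--     for si, (title, typ) in enumerate(sections):
--         lines.append("    {")
--         lines.append("      title: '%s'," % js_escape(title))
--         lines.append("      items: [")
--         section_items = [it for it in merged.values() if (it.get('type') == typ)]
--         section_items.sort(key=lambda x: (x.get('token') or '').lower())
--         for ii, it in enumerate(section_items):
--             comma = ',' if ii < len(section_items) - 1 else ''
--             lines.append(
--                 "        { token: '%s', type: '%s', description: '%s'%s }%s" % (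
--                     js_escape(it.get('token') or ''),
--                     js_escape(it.get('type') or ''),
--                     js_escape(it.get('description') or ''),
--                     (", example: '%s'" % js_escape(it.get('example') or '')) if (it.get('example')) else '',
--                     comma)
--             )
--         lines.append("      ]")
--         lines.append("    }%s" % (',' if si < len(sections) - 1 else ''))
--     lines.append("  ]")
--     lines.append("};")
--     lines.append("")
--     return '\n'.join(lines)
-- ===== SOURCE B (Python) =====
-- from typing import Dict, List, Optional, Tuple
--
--
-- def js_escape(s: Optional[str]) -> str:
--     if s is None:
--         return ''
--     s = s.replace('\\', '\\\\').replace("'", "\\'")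
--     s = s.replace('\r\n', '\n').replace('\n', '\\n')
--     return s
--
--
-- def to_c_dictionary_js(merged: Dict[str, Dict[str, Optional[str]]]) -> str:
--     # One grouping pass: bucket every item by its 'type' field, then emit
--     # each fixed section from its bucket; the text is assembled by joins,
--     # not by an indexed lines list.
--     buckets: Dict[Optional[str], List[Dict[str, Optional[str]]]] = {}
--     for it in merged.values():
--         buckets.setdefault(it.get('type'), []).append(it)
--
--     def item_str(it: Dict[str, Optional[str]]) -> str:
--         example = it.get('example') or ''
--         return "        { token: '%s', type: '%s', description: '%s'%s }" % (
--             js_escape(it.get('token') or ''),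
--             js_escape(it.get('type') or ''),
--             js_escape(it.get('description') or ''),
--             (", example: '%s'" % js_escape(example)) if example else '')
--
--     def section_str(title: str, typ: str) -> str:
--         items = sorted(buckets.get(typ, []),
--                        key=lambda x: (x.get('token') or '').lower())
--         body = ",\n".join(item_str(it) for it in items)
--         return ("    {\n      title: '%s',\n      items: [\n" % js_escape(title)
--                 + (body + "\n" if items else "")
--                 + "      ]\n    }")
--
--     sections: List[Tuple[str, str]] = [
--         ('Keywords', 'keyword'),
--         ('Operators', 'operator'),
--         ('Standard Library Identifiers', 'identifier')
--     ]
--     return ("// Auto-generated from C_Dictionary.md. Do not edit manually.\n"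
--             "module.exports = {\n"
--             "  title: 'C Language Reference',\n"
--             "  sections: [\n"
--             + ",\n".join(section_str(title, typ) for title, typ in sections)
--             + "\n  ]\n};\n")
-- ===== Notes on version B (the rewrite author's own statement) =====
-- stated objective: alternative
-- what changed: Replaces A's per-section filter scan over merged.values() plus an indexed lines list with one bucketing pass grouping items by 'type' (dict of lists) and assembles the text by ',\n'-joins of per-item/per-section strings instead of enumerate-driven trailing commas.
import Mathlib
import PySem

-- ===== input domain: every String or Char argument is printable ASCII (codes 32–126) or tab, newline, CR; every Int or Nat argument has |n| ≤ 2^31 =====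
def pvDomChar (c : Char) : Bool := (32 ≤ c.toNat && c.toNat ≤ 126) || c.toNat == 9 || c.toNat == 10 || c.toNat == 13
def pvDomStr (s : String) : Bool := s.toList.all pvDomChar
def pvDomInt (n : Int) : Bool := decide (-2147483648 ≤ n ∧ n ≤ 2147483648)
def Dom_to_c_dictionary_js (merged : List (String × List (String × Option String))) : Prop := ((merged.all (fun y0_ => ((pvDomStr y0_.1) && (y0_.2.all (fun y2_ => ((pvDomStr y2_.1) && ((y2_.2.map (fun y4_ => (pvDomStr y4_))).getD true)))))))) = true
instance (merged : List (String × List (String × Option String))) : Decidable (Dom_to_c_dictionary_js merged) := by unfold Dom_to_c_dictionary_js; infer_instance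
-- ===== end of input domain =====

-- B replaces A's three filter scans + indexed lines list by one bucketing pass over the
-- items grouped by 'type' and assembles the text with ',\n'-joins (objective: alternative).

-- ===== PORT A =====

-- shared module helper js_escape (used verbatim by both Pythons)
def jsEscape (s : Option String) : String :=
  match s with
  | none => ""
  | some s =>
    let s := PySem.Str.replace (PySem.Str.replace s "\\" "\\\\") "'" "\\'"
    PySem.Str.replace (PySem.Str.replace s "\r\n" "\n") "\n" "\\n"

-- shared accessor: Python's it.get(k) on an inner dict (default None)
def itGet (it : List (String × Option String)) (k : String) : Option String :=
  PySem.Dict.getD (PySem.Dict.ofList it) k none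

-- port of A: lines list built by an enumerate-style fold (index carried in the state)
def to_c_dictionary_js (merged : List (String × List (String × Option String))) : String :=
  let sections : List (String × String) :=
    [("Keywords", "keyword"), ("Operators", "operator"),
     ("Standard Library Identifiers", "identifier")]
  let lines : List String :=
    ["// Auto-generated from C_Dictionary.md. Do not edit manually.",
     "module.exports = {",
     "  title: 'C Language Reference',",
     "  sections: ["]
  let st := sections.foldl (fun (st : List String × Nat) tt =>
    let lines := st.1 ++ ["    {"]
    let lines := lines ++ ["      title: '" ++ jsEscape (some tt.1) ++ "',"]
    let lines := lines ++ ["      items: ["]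
    let section_items :=
      (PySem.Dict.values (PySem.Dict.ofList merged)).filter
        (fun it => itGet it "type" == some tt.2)
    let section_items :=
      PySem.List.sorted section_items (fun x => PySem.Str.lower ((itGet x "token").getD ""))
    let st2 := section_items.foldl (fun (st2 : List String × Nat) it =>
      (st2.1 ++
        ["        { token: '" ++ jsEscape (some ((itGet it "token").getD "")) ++
         "', type: '" ++ jsEscape (some ((itGet it "type").getD "")) ++
         "', description: '" ++ jsEscape (some ((itGet it "description").getD "")) ++ "'" ++
         (if ((itGet it "example").getD "") ≠ "" then
            ", example: '" ++ jsEscape (some ((itGet it "example").getD "")) ++ "'"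
          else "") ++
         " }" ++ (if st2.2 < section_items.length - 1 then "," else "")],
       st2.2 + 1)) (lines, 0)
    let lines := st2.1 ++ ["      ]"]
    let lines := lines ++ ["    }" ++ (if st.2 < sections.length - 1 then "," else "")]
    (lines, st.2 + 1)) (lines, 0)
  PySem.Str.join "\n" (st.1 ++ ["  ]", "};", ""])

-- ===== PORT B =====

-- helper item_str of B: one item's text, no trailing comma
def itemStrAlt (it : List (String × Option String)) : String :=
  let ex := (itGet it "example").getD ""
  "        { token: '" ++ jsEscape (some ((itGet it "token").getD "")) ++
  "', type: '" ++ jsEscape (some ((itGet it "type").getD "")) ++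
  "', description: '" ++ jsEscape (some ((itGet it "description").getD "")) ++ "'" ++
  (if ex ≠ "" then ", example: '" ++ jsEscape (some ex) ++ "'" else "") ++
  " }"

-- helper section_str of B: one section's text from its bucket
def sectionStrAlt
    (buckets : PySem.Dict (Option String) (List (List (String × Option String))))
    (title typ : String) : String :=
  let items :=
    PySem.List.sorted (buckets.getD (some typ) [])
      (fun x => PySem.Str.lower ((itGet x "token").getD ""))
  let body := PySem.Str.join ",\n" (items.map itemStrAlt)
  "    {\n      title: '" ++ jsEscape (some title) ++ "',\n      items: [\n" ++
  (if items.isEmpty then "" else body ++ "\n") ++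
  "      ]\n    }"

-- port of B: one bucketing pass (setdefault/append = modify with default []), then joins
def to_c_dictionary_js_alt (merged : List (String × List (String × Option String))) : String :=
  let buckets :=
    (PySem.Dict.values (PySem.Dict.ofList merged)).foldl
      (fun d it => d.modify (itGet it "type") [] (· ++ [it])) PySem.Dict.empty
  let sections : List (String × String) :=
    [("Keywords", "keyword"), ("Operators", "operator"),
     ("Standard Library Identifiers", "identifier")]
  "// Auto-generated from C_Dictionary.md. Do not edit manually.\nmodule.exports = {\n  title: 'C Language Reference',\n  sections: [\n" ++
  PySem.Str.join ",\n" (sections.map (fun tt => sectionStrAlt buckets tt.1 tt.2)) ++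
  "\n  ]\n};\n"

-- ===== PRECONDITION & SPEC =====
def Spec_to_c_dictionary_js (merged : List (String × List (String × Option String))) (out : String) : Prop := out = to_c_dictionary_js_alt merged
instance (merged : List (String × List (String × Option String))) (out : String) : Decidable (Spec_to_c_dictionary_js merged out) := by unfold Spec_to_c_dictionary_js; infer_instance

-- ===== CLAIM (what is proved, stated in full; the proofs are below) =====
def Claim_equal_to_c_dictionary_js : Prop := ∀ (merged : List (String × List (String × Option String))), Dom_to_c_dictionary_js merged → Spec_to_c_dictionary_js merged (to_c_dictionary_js merged)

-- ===== LEMMAS AND PROOFS =====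

-- B's bucket at key (some t) holds exactly A's filtered items, in order
lemma bucket_eq (vals : List (List (String × Option String))) (t : String) :
    ((vals.foldl (fun d it => d.modify (itGet it "type") [] (· ++ [it]))
        PySem.Dict.empty).getD (some t) [])
      = vals.filter (fun it => itGet it "type" == some t) := by
  have h := PySem.Dict.getD_foldl_modify_append
    (vals.map (fun it => (itGet it "type", it))) PySem.Dict.empty (some t)
  simp only [List.foldl_map] at h
  rw [h]
  simp [PySem.Dict.getD_empty, List.filter_map, Function.comp_def]

-- commas of A's item loop: a comma after every item but the last
def commafy : List String → List String
  | [] => []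
  | [x] => [x]
  | x :: y :: r => (x ++ ",") :: commafy (y :: r)

lemma commafy_ne_nil (x : String) (xs : List String) : commafy (x :: xs) ≠ [] := by
  cases xs <;> simp [commafy]

-- A's enumerate-style item fold, characterised
lemma foldA {α : Type} (fmt : α → String) (n : Nat) :
    ∀ (L : List α) (acc : List String) (k : Nat), k + L.length = n →
      L.foldl (fun st it => (st.1 ++ [fmt it ++ (if st.2 < n - 1 then "," else "")], st.2 + 1))
          (acc, k)
        = (acc ++ commafy (L.map fmt), k + L.length) := by
  intro L
  induction L with
  | nil => intro acc k h; simp [commafy]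
  | cons x r ih =>
    intro acc k h
    simp only [List.foldl_cons, List.length_cons]
    cases r with
    | nil =>
      have hk : ¬ k < n - 1 := by simp at h; omega
      simp [hk, commafy]
    | cons y r' =>
      have hk : k < n - 1 := by simp at h; omega
      rw [if_pos hk, ih (acc ++ [fmt x ++ ","]) (k + 1) (by simp at h ⊢; omega)]
      simp [commafy, Prod.ext_iff]
      all_goals omega

lemma foldA0 {α : Type} (fmt : α → String) (L : List α) (acc : List String) :
    L.foldl (fun st it => (st.1 ++ [fmt it ++ (if st.2 < L.length - 1 then "," else "")], st.2 + 1))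
        (acc, 0)
      = (acc ++ commafy (L.map fmt), L.length) := by
  simpa using foldA fmt L.length L acc 0 (by simp)

-- '\n'.join over a cons
lemma join_cons (sep a : String) (l : List String) (h : l ≠ []) :
    PySem.Str.join sep (a :: l) = a ++ sep ++ PySem.Str.join sep l := by
  cases l with
  | nil => exact absurd rfl h
  | cons b t =>
    rw [← String.toList_inj]
    simp [PySem.Str.join, PySem.Chars.join, String.toList_append, List.intercalate]

-- '\n'.join over A's comma'd items = ',\n'.join over the raw items
lemma join_commafy_append (rest : List String) (hrest : rest ≠ []) :
    ∀ (X : List String),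
      PySem.Str.join "\n" (commafy X ++ rest)
        = (if X.isEmpty then "" else PySem.Str.join ",\n" X ++ "\n") ++ PySem.Str.join "\n" rest
  | [] => by
    rw [← String.toList_inj]
    simp [commafy]
  | [x] => by
    rw [commafy, List.singleton_append, join_cons _ _ _ hrest, ← String.toList_inj]
    simp [PySem.Str.join, PySem.Chars.join, List.intercalate, String.toList_append]
  | x :: y :: r => by
    rw [commafy, List.cons_append,
      join_cons _ _ _ (by simp [commafy_ne_nil]),
      join_commafy_append rest hrest (y :: r),
      ← String.toList_inj]
    have hy : PySem.Str.join ",\n" (x :: y :: r) = x ++ ",\n" ++ PySem.Str.join ",\n" (y :: r) :=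
      join_cons _ _ _ (by simp)
    simp [hy, String.toList_append]


lemma join_singleton (sep x : String) : PySem.Str.join sep [x] = x := by
  rw [← String.toList_inj]
  simp [PySem.Str.join, PySem.Chars.join, List.intercalate]

-- B's item helper, eta/zeta-expanded to A's inline item expression
lemma itemStrAlt_eq : itemStrAlt = fun it =>
    "        { token: '" ++ jsEscape (some ((itGet it "token").getD "")) ++
    "', type: '" ++ jsEscape (some ((itGet it "type").getD "")) ++
    "', description: '" ++ jsEscape (some ((itGet it "description").getD "")) ++ "'" ++
    (if ((itGet it "example").getD "") ≠ "" then
      ", example: '" ++ jsEscape (some ((itGet it "example").getD "")) ++ "'" else "") ++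
    " }" := rfl

-- ===== VERDICT (by name: the statement is the Claim_ definition above) =====
set_option maxRecDepth 8192 in
theorem to_c_dictionary_js_spec : Claim_equal_to_c_dictionary_js := by
  intro merged _
  unfold Spec_to_c_dictionary_js to_c_dictionary_js to_c_dictionary_js_alt
  simp only [List.foldl_cons, List.foldl_nil]
  rw [foldA0, foldA0, foldA0]
  simp only [bucket_eq, sectionStrAlt, itemStrAlt_eq, List.map_cons, List.map_nil,
    List.length_cons, List.length_nil, List.append_assoc, List.cons_append, List.nil_append,
    List.isEmpty_iff]
  norm_num
  repeat first
    | rw [join_singleton]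
    | rw [join_cons _ _ _ (by simp)]
    | rw [join_commafy_append _ (by simp)]
  rw [← String.toList_inj]
  simp [String.toList_append, List.isEmpty_iff]
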